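-- pv_equiv track=rewrite | github.com/kouseph/Biotech_MLP | testing_diff_data.py | get_feature_sets
-- ===== SOURCE A (Python) =====
-- def get_feature_sets(columns: list[str]) -> dict[str, list[str]]:
--     quarterly_markers = [
--         "total_cash",
--         "lfcf",
--         "fundamental",
--         "days_since_total_cash_report",
--         "days_since_lfcf_report",
--     ]
--     dynamic_keys = ["qoq", "yoy", "trend", "improving", "to_total_cash"]
--     quarterly_base = [
--         "total_cash",
--         "lfcf",
--         "fundamental",
--         "days_since_total_cash_report",
--         "days_since_lfcf_report",
--     ]
--
--     monthly_only = [c for c in columns if not any(k in c for k in quarterly_markers)]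
--     quarterly_levels = [
--         c
--         for c in columns
--         if any(k in c for k in quarterly_base) and not any(d in c for d in dynamic_keys)
--     ]
--     quarterly_dynamics = [c for c in columns if any(d in c for d in dynamic_keys)]
--
--     return {
--         "monthly_only": monthly_only,
--         "monthly_plus_quarterly_levels": sorted(set(monthly_only + quarterly_levels)),
--         "monthly_plus_levels_plus_dynamics": sorted(
--             set(monthly_only + quarterly_levels + quarterly_dynamics)
--         ),
--     }
-- ===== SOURCE B (Python) =====
-- def get_feature_sets(columns: list[str]) -> dict[str, list[str]]:
--     markers = [
--         "total_cash",
--         "lfcf",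
--         "fundamental",
--         "days_since_total_cash_report",
--         "days_since_lfcf_report",
--     ]
--     dynamics = ["qoq", "yoy", "trend", "improving", "to_total_cash"]
--
--     monthly_only = []
--     levels_set = set()
--     for c in columns:
--         has_marker = any(k in c for k in markers)
--         has_dynamic = any(d in c for d in dynamics)
--         if not has_marker:
--             monthly_only.append(c)
--         if not has_marker or not has_dynamic:
--             levels_set.add(c)
--
--     return {
--         "monthly_only": monthly_only,
--         "monthly_plus_quarterly_levels": sorted(levels_set),
--         "monthly_plus_levels_plus_dynamics": sorted(set(columns)),
--     }
-- ===== Notes on version B (the rewrite author's own statement) =====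
-- stated objective: simpler
-- what changed: Single pass over columns computing has_marker/has_dynamic once per column instead of three separate comprehensions with repeated substring scans, and the third bucket simplified to sorted(set(columns)) since the three categories cover every column.
import Mathlib
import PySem

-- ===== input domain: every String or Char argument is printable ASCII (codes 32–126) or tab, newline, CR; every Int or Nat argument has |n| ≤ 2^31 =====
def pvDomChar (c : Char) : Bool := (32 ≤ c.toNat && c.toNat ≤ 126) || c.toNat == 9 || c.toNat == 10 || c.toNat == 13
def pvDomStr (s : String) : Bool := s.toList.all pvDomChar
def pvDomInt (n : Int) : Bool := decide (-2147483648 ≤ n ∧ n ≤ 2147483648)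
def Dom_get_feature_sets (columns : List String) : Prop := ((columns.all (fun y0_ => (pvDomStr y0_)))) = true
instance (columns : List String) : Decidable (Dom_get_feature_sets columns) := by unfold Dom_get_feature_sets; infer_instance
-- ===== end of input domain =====

-- B is a single pass over columns computing the two substring tests once per column
-- (objective: simpler decomposition); same return value, proved below.

-- ===== PORT A =====
def pvQuarterlyMarkers : List String :=
  ["total_cash", "lfcf", "fundamental", "days_since_total_cash_report", "days_since_lfcf_report"]
def pvDynamicKeys : List String := ["qoq", "yoy", "trend", "improving", "to_total_cash"]
def pvQuarterlyBase : List String :=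
  ["total_cash", "lfcf", "fundamental", "days_since_total_cash_report", "days_since_lfcf_report"]

def get_feature_sets (columns : List String) : List (String × List String) :=
  let monthly_only := columns.filter (fun c => !(pvQuarterlyMarkers.any (fun k => PySem.Str.isIn k c)))
  let quarterly_levels := columns.filter (fun c =>
    (pvQuarterlyBase.any (fun k => PySem.Str.isIn k c)) &&
      !(pvDynamicKeys.any (fun d => PySem.Str.isIn d c)))
  let quarterly_dynamics := columns.filter (fun c => pvDynamicKeys.any (fun d => PySem.Str.isIn d c))
  [("monthly_only", monthly_only),
   ("monthly_plus_quarterly_levels",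
     PySem.List.sorted (PySem.Set.ofList (monthly_only ++ quarterly_levels)) (fun x => x) false),
   ("monthly_plus_levels_plus_dynamics",
     PySem.List.sorted (PySem.Set.ofList (monthly_only ++ quarterly_levels ++ quarterly_dynamics)) (fun x => x) false)]

-- ===== PORT B =====
def pvMarkers : List String :=
  ["total_cash", "lfcf", "fundamental", "days_since_total_cash_report", "days_since_lfcf_report"]
def pvDynamics : List String := ["qoq", "yoy", "trend", "improving", "to_total_cash"]

def get_feature_sets_alt (columns : List String) : List (String × List String) :=
  let st := columns.foldl (fun (acc : List String × PySem.Set String) c =>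
    let has_marker := pvMarkers.any (fun k => PySem.Str.isIn k c)
    let has_dynamic := pvDynamics.any (fun d => PySem.Str.isIn d c)
    let mo := if !has_marker then acc.1 ++ [c] else acc.1
    let lv := if !has_marker || !has_dynamic then PySem.Set.add acc.2 c else acc.2
    (mo, lv)) ([], PySem.Set.empty)
  [("monthly_only", st.1),
   ("monthly_plus_quarterly_levels", PySem.List.sorted st.2 (fun x => x) false),
   ("monthly_plus_levels_plus_dynamics",
     PySem.List.sorted (PySem.Set.ofList columns) (fun x => x) false)]

-- ===== PRECONDITION & SPEC =====
def Spec_get_feature_sets (columns : List String) (out : List (String × List String)) : Prop := out = get_feature_sets_alt columns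
instance (columns : List String) (out : List (String × List String)) : Decidable (Spec_get_feature_sets columns out) := by unfold Spec_get_feature_sets; infer_instance

-- ===== CLAIM (what is proved, stated in full; the proofs are below) =====
def Claim_equal_get_feature_sets : Prop := ∀ (columns : List String), Dom_get_feature_sets columns → Spec_get_feature_sets columns (get_feature_sets columns)

-- ===== LEMMAS AND PROOFS =====

-- has_marker / has_dynamic predicates (the two lists of constants coincide across the ports)
def pvHM (c : String) : Bool := pvMarkers.any (fun k => PySem.Str.isIn k c)
def pvHD (c : String) : Bool := pvDynamics.any (fun d => PySem.Str.isIn d c)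

-- B's fold, characterised: first component appends the marker-free columns,
-- second component is Set.update with the columns passing the level test.
theorem pv_fold_char (columns : List String) (m : List String) (s : PySem.Set String) :
    columns.foldl (fun (acc : List String × PySem.Set String) c =>
      let has_marker := pvMarkers.any (fun k => PySem.Str.isIn k c)
      let has_dynamic := pvDynamics.any (fun d => PySem.Str.isIn d c)
      let mo := if !has_marker then acc.1 ++ [c] else acc.1
      let lv := if !has_marker || !has_dynamic then PySem.Set.add acc.2 c else acc.2
      (mo, lv)) (m, s)
    = (m ++ columns.filter (fun c => !pvHM c),
       PySem.Set.update s (columns.filter (fun c => !pvHM c || !pvHD c))) := by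
  induction columns generalizing m s with
  | nil => simp [PySem.Set.update]
  | cons c cs ih =>
      simp only [List.foldl_cons, List.filter_cons, pvHM, pvHD]
      cases hm : (pvMarkers.any fun k => PySem.Str.isIn k c) <;>
        cases hd : (pvDynamics.any fun d => PySem.Str.isIn d c) <;>
        simp only [hm, hd, Bool.not_true, Bool.not_false, Bool.false_or, Bool.or_self,
          Bool.or_true, Bool.true_or, Bool.or_false, if_true, if_false, ite_true, ite_false,
          Bool.false_eq_true, ih, pvHM, pvHD, PySem.Set.update, List.foldl_cons,
          List.append_assoc, List.singleton_append, reduceIte]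

theorem pv_perm_of_mem_iff {xs ys : List String}
    (h : ∀ a, a ∈ xs ↔ a ∈ ys) :
    PySem.List.sorted (PySem.Set.ofList xs) (fun x => x) false
      = PySem.List.sorted (PySem.Set.ofList ys) (fun x => x) false := by
  rw [PySem.List.sorted_id_eq_sorted_id_iff_perm]
  rw [List.perm_ext_iff_of_nodup (PySem.Set.nodup_ofList xs) (PySem.Set.nodup_ofList ys)]
  intro a
  rw [PySem.Set.mem_ofList, PySem.Set.mem_ofList]
  exact h a

-- ===== VERDICT (by name: the statement is the Claim_ definition above) =====
theorem get_feature_sets_spec : Claim_equal_get_feature_sets := by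
  intro columns _
  unfold Spec_get_feature_sets
  simp only [get_feature_sets, get_feature_sets_alt, pv_fold_char, List.nil_append]
  have hupd : (PySem.Set.update PySem.Set.empty
      (columns.filter (fun c => !pvHM c || !pvHD c)) : PySem.Set String)
      = PySem.Set.ofList (columns.filter (fun c => !pvHM c || !pvHD c)) := by
    rw [PySem.Set.ofList_eq_foldl]; rfl
  rw [hupd]
  have hcov : ∀ c : String,
      ((!pvHM c) = true ∨ (pvHM c && !pvHD c) = true ↔ (!pvHM c || !pvHD c) = true)
      ∧ ((!pvHM c) = true ∨ (pvHM c && !pvHD c) = true ∨ pvHD c = true) := by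
    intro c; cases h1 : pvHM c <;> cases h2 : pvHD c <;> simp
  have h2 : PySem.List.sorted (PySem.Set.ofList
        (columns.filter (fun c => !pvHM c) ++
         columns.filter (fun c => pvHM c && !pvHD c))) (fun x => x) false
      = PySem.List.sorted (PySem.Set.ofList
        (columns.filter (fun c => !pvHM c || !pvHD c))) (fun x => x) false := by
    apply pv_perm_of_mem_iff
    intro a
    simp only [List.mem_append, List.mem_filter]
    constructor
    · rintro (⟨ha, hb⟩ | ⟨ha, hb⟩) <;> exact ⟨ha, ((hcov a).1.mp (by tauto))⟩
    · rintro ⟨ha, hb⟩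
      rcases (hcov a).2 with h | h | h
      · exact Or.inl ⟨ha, h⟩
      · exact Or.inr ⟨ha, h⟩
      · cases hm : pvHM a
        · exact Or.inl ⟨ha, by simp [hm]⟩
        · exact absurd hb (by simp [hm, h])
  have h3 : PySem.List.sorted (PySem.Set.ofList
        (columns.filter (fun c => !pvHM c) ++
         columns.filter (fun c => pvHM c && !pvHD c) ++
         columns.filter (fun c => pvHD c))) (fun x => x) false
      = PySem.List.sorted (PySem.Set.ofList columns) (fun x => x) false := by
    apply pv_perm_of_mem_iff
    intro a
    simp only [List.mem_append, List.mem_filter]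
    constructor
    · rintro ((⟨ha, _⟩ | ⟨ha, _⟩) | ⟨ha, _⟩) <;> exact ha
    · intro ha
      rcases (hcov a).2 with h | h | h
      · exact Or.inl (Or.inl ⟨ha, h⟩)
      · exact Or.inl (Or.inr ⟨ha, h⟩)
      · exact Or.inr ⟨ha, h⟩
  have e1 : (fun c => !(pvQuarterlyMarkers.any fun k => PySem.Str.isIn k c)) = (fun c => !pvHM c) := rfl
  have e2 : (fun c => (pvQuarterlyBase.any fun k => PySem.Str.isIn k c) && !(pvDynamicKeys.any fun d => PySem.Str.isIn d c)) = (fun c => pvHM c && !pvHD c) := rfl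
  have e3 : (fun c => pvDynamicKeys.any fun d => PySem.Str.isIn d c) = (fun c => pvHD c) := rfl
  rw [e1, e2, e3, h2, h3]
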